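-- pv_equiv track=rewrite | github.com/x983193082/skidcon | backend/report.py | _calculate_risk_rating
-- ===== SOURCE A (Python) =====
-- def _calculate_risk_rating(vulnerabilities: list) -> str:
--     """计算整体风险评级"""
--     if not vulnerabilities:
--         return "Low"
--
--     severity_scores = {"Critical": 4, "High": 3, "Medium": 2, "Low": 1, "Info": 0}
--     max_score = max((severity_scores.get(v.get("severity", "Low"), 0) for v in vulnerabilities), default=0)
--
--     if max_score >= 4: return "Critical"
--     elif max_score >= 3: return "High"
--     elif max_score >= 2: return "Medium"
--     else: return "Low"
-- ===== SOURCE B (Python) =====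
-- def _calculate_risk_rating(vulnerabilities: list) -> str:
--     """Tier scan: return the highest tier present, without a score table or running max."""
--     for tier in ("Critical", "High", "Medium"):
--         if any(v.get("severity", "Low") == tier for v in vulnerabilities):
--             return tier
--     return "Low"
-- ===== Notes on version B (the rewrite author's own statement) =====
-- stated objective: simpler
-- what changed: Replaced the numeric score dict + running max + threshold chain by a short-circuit scan over the tiers Critical/High/Medium in priority order, returning the first tier any vulnerability carries (Low otherwise).
import Mathlib
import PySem

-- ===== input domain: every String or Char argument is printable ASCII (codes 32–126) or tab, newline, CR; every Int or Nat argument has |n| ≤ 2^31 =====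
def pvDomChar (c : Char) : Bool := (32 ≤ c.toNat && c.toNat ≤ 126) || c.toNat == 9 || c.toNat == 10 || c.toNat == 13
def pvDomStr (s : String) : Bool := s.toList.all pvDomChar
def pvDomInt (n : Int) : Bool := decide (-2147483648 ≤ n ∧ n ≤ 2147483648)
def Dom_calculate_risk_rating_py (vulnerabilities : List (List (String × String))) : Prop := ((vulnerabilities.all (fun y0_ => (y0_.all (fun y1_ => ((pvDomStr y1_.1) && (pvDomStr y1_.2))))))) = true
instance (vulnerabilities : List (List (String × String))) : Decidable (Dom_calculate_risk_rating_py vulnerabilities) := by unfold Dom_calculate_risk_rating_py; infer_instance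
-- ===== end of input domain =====

-- B replaces A's score dict + running max + threshold chain by a priority scan over the
-- tiers Critical/High/Medium, returning the first tier present (simpler decomposition).

-- ===== PORT A =====
-- severity_scores = {"Critical": 4, "High": 3, "Medium": 2, "Low": 1, "Info": 0}
def pvSeverityScores : PySem.Dict String Int :=
  PySem.Dict.mk [("Critical", 4), ("High", 3), ("Medium", 2), ("Low", 1), ("Info", 0)]

-- severity_scores.get(v.get("severity", "Low"), 0)
def pvScoreA (v : List (String × String)) : Int :=
  PySem.Dict.getD pvSeverityScores (PySem.Dict.getD (PySem.Dict.mk v) "severity" "Low") 0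

def calculate_risk_rating_py (vulnerabilities : List (List (String × String))) : String :=
  if vulnerabilities = [] then "Low"
  else
    let max_score : Int :=
      (PySem.List.max? (vulnerabilities.map pvScoreA) (fun x => x)).getD 0
    if max_score ≥ 4 then "Critical"
    else if max_score ≥ 3 then "High"
    else if max_score ≥ 2 then "Medium"
    else "Low"

-- ===== PORT B =====
-- v.get("severity", "Low")
def pvSevB (v : List (String × String)) : String :=
  PySem.Dict.getD (PySem.Dict.mk v) "severity" "Low"

-- for tier in ("Critical","High","Medium"): if any(... == tier): return tier; return "Low"
def pvTierLoop (vulnerabilities : List (List (String × String))) : List String → String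
  | [] => "Low"
  | tier :: rest =>
      if vulnerabilities.any (fun v => pvSevB v == tier) then tier
      else pvTierLoop vulnerabilities rest

def calculate_risk_rating_py_alt (vulnerabilities : List (List (String × String))) : String :=
  pvTierLoop vulnerabilities ["Critical", "High", "Medium"]

-- ===== PRECONDITION & SPEC =====
def Spec_calculate_risk_rating_py (vulnerabilities : List (List (String × String))) (out : String) : Prop := out = calculate_risk_rating_py_alt vulnerabilities
instance (vulnerabilities : List (List (String × String))) (out : String) : Decidable (Spec_calculate_risk_rating_py vulnerabilities out) := by unfold Spec_calculate_risk_rating_py; infer_instance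

-- ===== CLAIM (what is proved, stated in full; the proofs are below) =====
def Claim_equal_calculate_risk_rating_py : Prop := ∀ (vulnerabilities : List (List (String × String))), Dom_calculate_risk_rating_py vulnerabilities → Spec_calculate_risk_rating_py vulnerabilities (calculate_risk_rating_py vulnerabilities)

-- ===== LEMMAS AND PROOFS =====

-- The score of a vulnerability, characterised by its severity string.
theorem pvScoreA_eq (v : List (String × String)) :
    pvScoreA v =
      if pvSevB v = "Critical" then 4
      else if pvSevB v = "High" then 3
      else if pvSevB v = "Medium" then 2
      else if pvSevB v = "Low" then 1
      else 0 := by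
  unfold pvScoreA pvSeverityScores pvSevB
  generalize PySem.Dict.getD (PySem.Dict.mk v) "severity" "Low" = s
  by_cases h1 : s = "Critical"
  · simp [h1, PySem.Dict.getD, PySem.Dict.get?]
  · by_cases h2 : s = "High"
    · simp [h2, PySem.Dict.getD, PySem.Dict.get?]
    · by_cases h3 : s = "Medium"
      · simp [h3, PySem.Dict.getD, PySem.Dict.get?]
      · by_cases h4 : s = "Low"
        · simp [h4, PySem.Dict.getD, PySem.Dict.get?]
        · by_cases h5 : s = "Info"
          · simp [h5, PySem.Dict.getD, PySem.Dict.get?]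
          · simp [h1, h2, h3, h4, PySem.Dict.getD, PySem.Dict.get?,
                  Ne.symm h1, Ne.symm h2, Ne.symm h3, Ne.symm h4, Ne.symm h5]

theorem calculate_risk_rating_py_spec : Claim_equal_calculate_risk_rating_py := by
  intro xs _
  unfold Spec_calculate_risk_rating_py calculate_risk_rating_py calculate_risk_rating_py_alt
  rcases hxs : xs with _ | ⟨v0, t⟩
  · simp [pvTierLoop]
  · rw [← hxs]
    have hne : xs ≠ [] := by rw [hxs]; simp
    simp only [hne, ite_false]
    obtain ⟨m, hm⟩ : ∃ m, PySem.List.max? (xs.map pvScoreA) (fun x => x) = some m := by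
      rcases h : PySem.List.max? (xs.map pvScoreA) (fun x => x) with _ | m
      · rw [PySem.List.max?_eq_none_iff] at h; simp [hxs] at h
      · exact ⟨m, rfl⟩
    have hmem := PySem.List.max?_mem hm
    have hmax := PySem.List.max?_isMax hm
    obtain ⟨vm, hvm, hvmeq⟩ := List.mem_map.mp hmem
    rw [hm]
    simp only [Option.getD_some, pvTierLoop]
    -- relate the max score to the tier membership tests
    by_cases hC : xs.any (fun v => pvSevB v == "Critical")
    · -- some Critical present → score 4 present → m ≥ 4
      obtain ⟨v, hv, hvs⟩ := List.any_eq_true.mp hC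
      have h4 : (4 : Int) ≤ m := by
        have := hmax _ (List.mem_map.mpr ⟨v, hv, rfl⟩)
        have hs : pvScoreA v = 4 := by rw [pvScoreA_eq]; simp_all
        simpa [hs] using this
      simp [hC, if_pos h4]
    · by_cases hH : xs.any (fun v => pvSevB v == "High")
      · obtain ⟨v, hv, hvs⟩ := List.any_eq_true.mp hH
        have h3 : (3 : Int) ≤ m := by
          have := hmax _ (List.mem_map.mpr ⟨v, hv, rfl⟩)
          have hs : pvScoreA v = 3 := by rw [pvScoreA_eq]; simp_all
          simpa [hs] using this
        have h4 : ¬ (4 : Int) ≤ m := by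
          have hnotC : pvSevB vm ≠ "Critical" := by
            intro hc
            exact hC (List.any_eq_true.mpr ⟨vm, hvm, by simp [hc]⟩)
          have : pvScoreA vm ≤ 3 := by rw [pvScoreA_eq]; split_ifs <;> simp_all
          omega
        simp [hC, hH, if_neg h4, if_pos h3]
      · by_cases hM : xs.any (fun v => pvSevB v == "Medium")
        · obtain ⟨v, hv, hvs⟩ := List.any_eq_true.mp hM
          have h2 : (2 : Int) ≤ m := by
            have := hmax _ (List.mem_map.mpr ⟨v, hv, rfl⟩)
            have hs : pvScoreA v = 2 := by rw [pvScoreA_eq]; simp_all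
            simpa [hs] using this
          have h3 : ¬ (3 : Int) ≤ m := by
            have hnotC : pvSevB vm ≠ "Critical" := fun hc =>
              hC (List.any_eq_true.mpr ⟨vm, hvm, by simp [hc]⟩)
            have hnotH : pvSevB vm ≠ "High" := fun hc =>
              hH (List.any_eq_true.mpr ⟨vm, hvm, by simp [hc]⟩)
            have : pvScoreA vm ≤ 2 := by rw [pvScoreA_eq]; split_ifs <;> simp_all
            omega
          simp [hC, hH, hM, if_neg (by omega : ¬ (4:Int) ≤ m), if_neg h3, if_pos h2]
        · have h2 : ¬ (2 : Int) ≤ m := by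
            have hnotC : pvSevB vm ≠ "Critical" := fun hc =>
              hC (List.any_eq_true.mpr ⟨vm, hvm, by simp [hc]⟩)
            have hnotH : pvSevB vm ≠ "High" := fun hc =>
              hH (List.any_eq_true.mpr ⟨vm, hvm, by simp [hc]⟩)
            have hnotM : pvSevB vm ≠ "Medium" := fun hc =>
              hM (List.any_eq_true.mpr ⟨vm, hvm, by simp [hc]⟩)
            have : pvScoreA vm ≤ 1 := by rw [pvScoreA_eq]; split_ifs <;> simp_all
            omega
          simp [hC, hH, hM, if_neg (by omega : ¬ (4:Int) ≤ m),
                if_neg (by omega : ¬ (3:Int) ≤ m), if_neg h2]
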